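-- pv_equiv track=rewrite | github.com/cl9bix/hazik | hazik/eljarasok/futar.py | fel_2
-- ===== SOURCE A (Python) =====
-- def fel_2(lst):
--     osszesen = 0
--     for i in lst:
--         if i <= 3:
--             osszesen += 500
--         elif i <= 7:
--             osszesen += 700
--         elif i <= 11:
--             osszesen += 900
--         elif i <= 15:
--             osszesen += 1400
--         elif i <= 20:
--             osszesen += 2000
--     return osszesen
-- ===== SOURCE B (Python) =====
-- def fel_2(lst):
--     # Aggregate by tier instead of per element: count how many items fall at or
--     # below each threshold, then pay each tier's fee times the size of its band.
--     total = 0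
--     prev = 0
--     for t, fee in ((3, 500), (7, 700), (11, 900), (15, 1400), (20, 2000)):
--         c = sum(1 for i in lst if i <= t)
--         total += fee * (c - prev)
--         prev = c
--     return total
-- ===== Notes on version B (the rewrite author's own statement) =====
-- stated objective: alternative
-- what changed: Instead of classifying each element and adding its fee in one pass, B makes five per-tier counting passes (cumulative counts of elements at or below each threshold) and computes the total as sum of fee * band-size differences.
import Mathlib
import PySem

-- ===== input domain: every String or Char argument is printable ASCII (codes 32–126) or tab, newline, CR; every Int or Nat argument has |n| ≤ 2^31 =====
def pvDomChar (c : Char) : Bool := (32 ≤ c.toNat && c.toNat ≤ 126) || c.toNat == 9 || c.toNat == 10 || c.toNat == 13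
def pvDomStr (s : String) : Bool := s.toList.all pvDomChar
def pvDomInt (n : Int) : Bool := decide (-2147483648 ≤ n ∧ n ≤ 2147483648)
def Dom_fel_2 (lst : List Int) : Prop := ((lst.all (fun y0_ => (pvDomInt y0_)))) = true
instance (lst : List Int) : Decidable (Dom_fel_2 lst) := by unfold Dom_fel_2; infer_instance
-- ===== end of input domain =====

-- ===== PORT A =====
-- B aggregates by tier: five cumulative counting passes, total = sum of fee * band size (same values; alternative, not faster).
def fel_2 (lst : List Int) : Int :=
  lst.foldl (fun osszesen i =>
    if i ≤ 3 then osszesen + 500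
    else if i ≤ 7 then osszesen + 700
    else if i ≤ 11 then osszesen + 900
    else if i ≤ 15 then osszesen + 1400
    else if i ≤ 20 then osszesen + 2000
    else osszesen) 0

-- ===== PORT B =====
def pvTiers : List (Int × Int) := [(3, 500), (7, 700), (11, 900), (15, 1400), (20, 2000)]
-- sum(1 for i in lst if i <= t)
def pvCountLe (lst : List Int) (t : Int) : Int := (lst.countP (fun i => i ≤ t) : Int)
def fel_2_alt (lst : List Int) : Int :=
  (pvTiers.foldl (fun (st : Int × Int) tf =>
    let c := pvCountLe lst tf.1
    (st.1 + tf.2 * (c - st.2), c)) (0, 0)).1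

-- ===== PRECONDITION & SPEC =====
def Spec_fel_2 (lst : List Int) (out : Int) : Prop := out = fel_2_alt lst
instance (lst : List Int) (out : Int) : Decidable (Spec_fel_2 lst out) := by unfold Spec_fel_2; infer_instance

-- ===== CLAIM =====
def Claim_equal_fel_2 : Prop := ∀ (lst : List Int), Dom_fel_2 lst → Spec_fel_2 lst (fel_2 lst)

-- ===== LEMMAS AND PROOFS =====
theorem alt_closed (lst : List Int) :
    fel_2_alt lst =
      500 * pvCountLe lst 3
      + 700 * (pvCountLe lst 7 - pvCountLe lst 3)
      + 900 * (pvCountLe lst 11 - pvCountLe lst 7)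
      + 1400 * (pvCountLe lst 15 - pvCountLe lst 11)
      + 2000 * (pvCountLe lst 20 - pvCountLe lst 15) := by
  simp [fel_2_alt, pvTiers]

theorem a_closed (lst : List Int) (acc : Int) :
    lst.foldl (fun osszesen i =>
      if i ≤ 3 then osszesen + 500
      else if i ≤ 7 then osszesen + 700
      else if i ≤ 11 then osszesen + 900
      else if i ≤ 15 then osszesen + 1400
      else if i ≤ 20 then osszesen + 2000
      else osszesen) acc =
    acc + 500 * pvCountLe lst 3
      + 700 * (pvCountLe lst 7 - pvCountLe lst 3)
      + 900 * (pvCountLe lst 11 - pvCountLe lst 7)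
      + 1400 * (pvCountLe lst 15 - pvCountLe lst 11)
      + 2000 * (pvCountLe lst 20 - pvCountLe lst 15) := by
  induction lst generalizing acc with
  | nil => simp [pvCountLe]
  | cons x l ih =>
    simp only [List.foldl_cons, ih, pvCountLe, List.countP_cons]
    split_ifs <;> simp only [decide_eq_true_eq] at * <;> push_cast <;> omega

-- ===== VERDICT =====
theorem fel_2_spec : Claim_equal_fel_2 := by
  intro lst _
  unfold Spec_fel_2
  rw [alt_closed, fel_2]
  rw [a_closed]
  ring
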